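-- pv_equiv track=rewrite | github.com/alexjsmith0115/synapse | src/synapse/indexer/java/java_http_extractor.py | _find_enclosing_symbol
-- ===== SOURCE A (Python) =====
-- def _find_enclosing_symbol(call_line_0: int, sorted_symbols: list[tuple[int, int, str]]) -> str | None:
--     """Return the full_name of the innermost symbol whose line range contains call_line_0."""
--     best: str | None = None
--     for start_0, end_0, full_name in sorted_symbols:
--         if start_0 <= call_line_0 <= end_0:
--             best = full_name
--         elif start_0 > call_line_0:
--             break
--     return best
-- ===== SOURCE B (Python) =====
-- def _find_enclosing_symbol(call_line_0: int, sorted_symbols: list[tuple[int, int, str]]) -> str | None: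
--     """Return the full_name of the innermost symbol whose line range contains call_line_0."""
--     # Stage 1: find the cut index k = first position whose start is past the line.
--     k = len(sorted_symbols)
--     for i, (start_0, _end_0, _name) in enumerate(sorted_symbols):
--         if start_0 > call_line_0:
--             k = i
--             break
--     # Stage 2: walk indices k-1 .. 0 and return the first symbol covering the line.
--     for i in range(k - 1, -1, -1):
--         if sorted_symbols[i][1] >= call_line_0:
--             return sorted_symbols[i][2]
--     return None
-- ===== Notes on version B (the rewrite author's own statement) =====
-- stated objective: alternative
-- what changed: B works in two staged index-based passes: it first computes the cut index k of the first symbol starting after the line, then walks indices k-1 down to 0 and returns at the first symbol whose end covers the line, instead of A's single forward tuple loop that accumulates the last match in a 'best' variable and breaks.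
import Mathlib
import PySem

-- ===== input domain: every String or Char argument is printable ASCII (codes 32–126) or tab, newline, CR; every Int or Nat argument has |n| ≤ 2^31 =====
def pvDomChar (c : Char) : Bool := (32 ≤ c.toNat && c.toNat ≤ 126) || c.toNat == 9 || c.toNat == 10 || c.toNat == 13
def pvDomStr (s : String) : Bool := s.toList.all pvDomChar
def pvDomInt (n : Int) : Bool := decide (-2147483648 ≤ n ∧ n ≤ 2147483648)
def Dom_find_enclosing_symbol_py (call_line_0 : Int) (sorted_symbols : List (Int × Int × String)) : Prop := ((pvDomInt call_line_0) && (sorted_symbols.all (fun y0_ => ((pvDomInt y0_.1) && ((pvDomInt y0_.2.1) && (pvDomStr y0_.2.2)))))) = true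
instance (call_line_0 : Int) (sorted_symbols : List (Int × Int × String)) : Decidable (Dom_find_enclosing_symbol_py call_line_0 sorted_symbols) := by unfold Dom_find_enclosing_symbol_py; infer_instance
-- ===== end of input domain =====

-- B replaces A's single forward accumulate-and-break loop by two staged index passes
-- (cut index, then a descending index scan with early return); objective: alternative.


-- ===== PORT A =====
-- A: forward loop accumulating the last match in `best`, breaking at the first start > call_line_0
def pvAgo (call_line_0 : Int) : Option String → List (Int × Int × String) → Option String
  | best, [] => best
  | best, (start_0, end_0, full_name) :: rest =>
    if start_0 ≤ call_line_0 ∧ call_line_0 ≤ end_0 then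
      pvAgo call_line_0 (some full_name) rest
    else if start_0 > call_line_0 then best
    else pvAgo call_line_0 best rest

def find_enclosing_symbol_py (call_line_0 : Int) (sorted_symbols : List (Int × Int × String)) : Option String :=
  pvAgo call_line_0 none sorted_symbols

-- ===== PORT B =====
-- B stage 1: enumerate-and-break loop computing the cut index k (first start > call_line_0, else length)
def pvCutIdx (call_line_0 : Int) : List (Int × Int × String) → Nat
  | [] => 0
  | (start_0, _, _) :: rest =>
    if start_0 > call_line_0 then 0 else pvCutIdx call_line_0 rest + 1

-- B stage 2: `for i in range(k-1, -1, -1)` — descending index loop with early return;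
-- the counter argument is k, the current index is k-1 (exact for the in-range indices this loop visits)
def pvDownFrom (call_line_0 : Int) (xs : List (Int × Int × String)) : Nat → Option String
  | 0 => none
  | i + 1 =>
    match PySem.List.pyGet? xs (i : Int) with
    | some (_, end_0, full_name) =>
      if end_0 ≥ call_line_0 then some full_name else pvDownFrom call_line_0 xs i
    | none => none

def find_enclosing_symbol_py_alt (call_line_0 : Int) (sorted_symbols : List (Int × Int × String)) : Option String :=
  pvDownFrom call_line_0 sorted_symbols (pvCutIdx call_line_0 sorted_symbols)

-- ===== PRECONDITION & SPEC =====
def Spec_find_enclosing_symbol_py (call_line_0 : Int) (sorted_symbols : List (Int × Int × String)) (out : Option String) : Prop := out = find_enclosing_symbol_py_alt call_line_0 sorted_symbols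
instance (call_line_0 : Int) (sorted_symbols : List (Int × Int × String)) (out : Option String) : Decidable (Spec_find_enclosing_symbol_py call_line_0 sorted_symbols out) := by unfold Spec_find_enclosing_symbol_py; infer_instance

-- ===== CLAIM (what is proved, stated in full; the proofs are below) =====
def Claim_equal_find_enclosing_symbol_py : Prop := ∀ (call_line_0 : Int) (sorted_symbols : List (Int × Int × String)), Dom_find_enclosing_symbol_py call_line_0 sorted_symbols → Spec_find_enclosing_symbol_py call_line_0 sorted_symbols (find_enclosing_symbol_py call_line_0 sorted_symbols)

-- ===== LEMMAS AND PROOFS =====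

-- the cut index is the length of the ≤-prefix
theorem pvCutIdx_eq (c : Int) (xs : List (Int × Int × String)) :
    pvCutIdx c xs = (xs.takeWhile (fun t => t.1 ≤ c)).length := by
  induction xs with
  | nil => rfl
  | cons h t ih =>
    obtain ⟨s, e, n⟩ := h
    by_cases hs : s > c
    · simp [pvCutIdx, hs, List.takeWhile, show ¬ s ≤ c by omega]
    · simp [pvCutIdx, hs, List.takeWhile, show s ≤ c by omega, ih]

-- A's loop never reads past the ≤-prefix
theorem pvAgo_takeWhile (c : Int) (b : Option String) (xs : List (Int × Int × String)) :
    pvAgo c b xs = pvAgo c b (xs.takeWhile (fun t => t.1 ≤ c)) := by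
  induction xs generalizing b with
  | nil => rfl
  | cons h t ih =>
    obtain ⟨s, e, n⟩ := h
    by_cases hs : s ≤ c
    · by_cases he : c ≤ e
      · simp [pvAgo, hs, he, List.takeWhile, ih]
      · simp [pvAgo, hs, he, show ¬ s > c by omega, List.takeWhile, ih]
    · simp [pvAgo, show s > c by omega, hs, List.takeWhile]

-- appending one in-range-start element to A's loop input updates the result from the right
theorem pvAgo_append_last (c : Int) (b : Option String) (s e : Int) (n : String)
    (zs : List (Int × Int × String)) (hs : s ≤ c) (hall : ∀ t ∈ zs, t.1 ≤ c) :
    pvAgo c b (zs ++ [(s, e, n)]) = if c ≤ e then some n else pvAgo c b zs := by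
  induction zs generalizing b with
  | nil => by_cases he : c ≤ e <;> simp [pvAgo, hs, he]
  | cons h t ih =>
    obtain ⟨s', e', n'⟩ := h
    have hs' : s' ≤ c := hall (s', e', n') (by simp)
    have hall' : ∀ u ∈ t, u.1 ≤ c := fun u hu => hall u (List.mem_cons_of_mem _ hu)
    by_cases he' : c ≤ e'
    · simp [pvAgo, hs', he', ih _ hall']
    · simp [pvAgo, hs', he', show ¬ s' > c by omega, ih _ hall']

-- one step of pvDownFrom at an in-range counter
theorem pvDownFrom_succ (c : Int) (xs : List (Int × Int × String)) (k : Nat) (hk : k < xs.length) :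
    pvDownFrom c xs (k + 1) =
      if c ≤ xs[k].2.1 then some xs[k].2.2 else pvDownFrom c xs k := by
  have hget : PySem.List.pyGet? xs (k : Int) = some xs[k] := by
    simp [PySem.List.pyGet?, PySem.List.pyIdx?, hk]
  rcases hx : xs[k] with ⟨s, e, n⟩
  simp [pvDownFrom, hget, hx, ge_iff_le]

-- the descending index scan agrees with A's loop run on the first k elements
theorem pvDownFrom_eq_pvAgo (c : Int) (xs : List (Int × Int × String)) (k : Nat)
    (hk : k ≤ xs.length) (hall : ∀ t ∈ xs.take k, t.1 ≤ c) :
    pvDownFrom c xs k = pvAgo c none (xs.take k) := by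
  induction k with
  | zero => simp [pvDownFrom, pvAgo]
  | succ k ih =>
    have hk' : k < xs.length := by omega
    have htake : xs.take (k + 1) = xs.take k ++ [xs[k]] := by
      rw [List.take_add_one, List.getElem?_eq_getElem hk']
      rfl
    have hmemk : xs[k] ∈ xs.take (k + 1) := by
      rw [htake]; exact List.mem_append_right _ (List.mem_singleton_self _)
    have hall' : ∀ t ∈ xs.take k, t.1 ≤ c := by
      intro t ht; exact hall t (by rw [htake]; exact List.mem_append_left _ ht)
    rcases hx : xs[k] with ⟨s, e, n⟩
    rw [pvDownFrom_succ c xs k hk', htake, hx,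
      pvAgo_append_last c none s e n (xs.take k)
        (by have := hall _ hmemk; rw [hx] at this; exact this) hall',
      ih (by omega) hall']

-- ===== VERDICT (by name: the statement is the Claim_ definition above) =====
theorem find_enclosing_symbol_py_spec : Claim_equal_find_enclosing_symbol_py := by
  intro c xs _
  unfold Spec_find_enclosing_symbol_py find_enclosing_symbol_py find_enclosing_symbol_py_alt
  have hpre := (List.prefix_iff_eq_take).1 (List.takeWhile_prefix (l := xs) (p := fun t => t.1 ≤ c))
  rw [pvAgo_takeWhile, pvCutIdx_eq, pvDownFrom_eq_pvAgo c xs _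
    ((List.takeWhile_prefix (l := xs) (p := fun t => t.1 ≤ c)).length_le)
    (by intro t ht; rw [← hpre] at ht; simpa using List.mem_takeWhile_imp ht), ← hpre]
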